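-- pv_equiv track=rewrite | github.com/NikolayRudko/Dominoes_AI | dominoes.py | calculate_numbers
-- ===== SOURCE A (Python) =====
-- def calculate_numbers(computer_pieces, domino_snake):
--     _weight_numbers = dict()
--     visible_piece = []
--     visible_piece.extend(computer_pieces)
--     visible_piece.extend(domino_snake)
--     for i in range(7):
--         count = 0
--         for item in visible_piece:
--             if item == [i, i]:
--                 count += 2
--             elif i in item:
--                 count += 1
--         _weight_numbers[i] = count
--     return _weight_numbers
-- ===== SOURCE B (Python) =====
-- def calculate_numbers(computer_pieces, domino_snake):
--     counts = {n: 0 for n in range(7)}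
--     for piece in computer_pieces + domino_snake:
--         for n in set(piece):
--             if n in counts:
--                 counts[n] += 2 if piece == [n, n] else 1
--     return counts
-- ===== Notes on version B (the rewrite author's own statement) =====
-- stated objective: alternative
-- what changed: A scans the whole piece list once per number 0..6 (seven passes, each with a per-number membership test); B initialises counts {0..6: 0} and makes a single pass over the pieces, each piece adding 2 to n if it is the double [n, n] and otherwise 1 for each distinct in-range number it contains.
import Mathlib
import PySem

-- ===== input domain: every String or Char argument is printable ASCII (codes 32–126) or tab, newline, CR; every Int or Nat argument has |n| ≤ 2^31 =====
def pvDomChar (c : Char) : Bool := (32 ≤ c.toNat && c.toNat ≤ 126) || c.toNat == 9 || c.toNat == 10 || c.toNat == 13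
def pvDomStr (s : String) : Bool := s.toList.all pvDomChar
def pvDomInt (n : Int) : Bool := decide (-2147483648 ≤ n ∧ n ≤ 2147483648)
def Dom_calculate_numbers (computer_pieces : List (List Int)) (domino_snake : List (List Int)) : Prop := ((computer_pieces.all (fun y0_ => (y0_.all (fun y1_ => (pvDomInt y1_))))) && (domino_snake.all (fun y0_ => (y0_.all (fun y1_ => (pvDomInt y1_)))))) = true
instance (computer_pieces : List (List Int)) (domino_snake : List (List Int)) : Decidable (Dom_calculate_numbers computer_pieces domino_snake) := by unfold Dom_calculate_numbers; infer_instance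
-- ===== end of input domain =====

-- B replaces A's 7xpieces nested scan with a single pass over the pieces updating a pre-initialised dict (one traversal instead of seven).


-- ===== PORT A =====
def calculate_numbers (computer_pieces : List (List Int)) (domino_snake : List (List Int)) : List (Int × Int) :=
  let visible_piece := computer_pieces ++ domino_snake
  ((PySem.List.pyRange 0 7 1).foldl (fun d i =>
      let count := visible_piece.foldl (fun c item =>
        if item = [i, i] then c + 2 else if i ∈ item then c + 1 else c) 0
      d.insert i count) PySem.Dict.empty).items

-- ===== PORT B =====
-- "if n in counts: counts[n] += 2 if piece == [n, n] else 1"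
def pvStep (piece : List Int) (d : PySem.Dict Int Int) (n : Int) : PySem.Dict Int Int :=
  if d.contains n then d.modify n 0 (· + (if piece = [n, n] then 2 else 1)) else d

-- one piece's update of the counts dict: "for n in set(piece): …"
-- (iteration order over the Python set does not affect the result, since each
--  distinct n touches only counts[n]; the port iterates in first-occurrence order)
def pvBump (d : PySem.Dict Int Int) (piece : List Int) : PySem.Dict Int Int :=
  (PySem.List.dedup piece).foldl (pvStep piece) d

def calculate_numbers_alt (computer_pieces : List (List Int)) (domino_snake : List (List Int)) : List (Int × Int) :=
  let counts := (PySem.List.pyRange 0 7 1).foldl (fun d n => d.insert n 0) PySem.Dict.empty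
  ((computer_pieces ++ domino_snake).foldl pvBump counts).items

-- ===== PRECONDITION & SPEC =====
def Spec_calculate_numbers (computer_pieces : List (List Int)) (domino_snake : List (List Int)) (out : List (Int × Int)) : Prop := out = calculate_numbers_alt computer_pieces domino_snake
instance (computer_pieces : List (List Int)) (domino_snake : List (List Int)) (out : List (Int × Int)) : Decidable (Spec_calculate_numbers computer_pieces domino_snake out) := by unfold Spec_calculate_numbers; infer_instance

-- ===== CLAIM (what is proved, stated in full; the proofs are below) =====
def Claim_equal_calculate_numbers : Prop := ∀ (computer_pieces : List (List Int)) (domino_snake : List (List Int)), Dom_calculate_numbers computer_pieces domino_snake → Spec_calculate_numbers computer_pieces domino_snake (calculate_numbers computer_pieces domino_snake)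

-- ===== LEMMAS AND PROOFS =====

-- total contribution of the pieces L to the count of number k
def pvS (k : Int) (L : List (List Int)) : Int :=
  (L.map (fun p => if p = [k, k] then 2 else if k ∈ p then (1 : Int) else 0)).sum

theorem pvS_nil (k : Int) : pvS k [] = 0 := rfl

theorem pvS_cons (k : Int) (p : List Int) (L : List (List Int)) :
    pvS k (p :: L) = (if p = [k, k] then 2 else if k ∈ p then (1 : Int) else 0) + pvS k L := by
  simp [pvS]

-- A's inner counting loop computes pvS
theorem countA_eq (k : Int) (L : List (List Int)) (c : Int) :
    L.foldl (fun c item => if item = [k, k] then c + 2 else if k ∈ item then c + 1 else c) c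
      = c + pvS k L := by
  induction L generalizing c with
  | nil => simp [pvS_nil]
  | cons p L ih => rw [List.foldl_cons, ih, pvS_cons]; split_ifs <;> ring

theorem keys_pvStep (p : List Int) (d : PySem.Dict Int Int) (v : Int) :
    (pvStep p d v).keys = d.keys := by
  unfold pvStep
  by_cases h : d.contains v = true
  · rw [if_pos h, PySem.Dict.keys_modify, PySem.Dict.keys_insert_of_contains _ _ h]
  · rw [if_neg h]

theorem contains_pvStep (p : List Int) (d : PySem.Dict Int Int) (v k : Int) :
    (pvStep p d v).contains k = d.contains k := by
  rw [PySem.Dict.contains_eq_decide_mem_keys, PySem.Dict.contains_eq_decide_mem_keys, keys_pvStep]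

theorem getD_pvStep (p : List Int) (d : PySem.Dict Int Int) (v k : Int) (hk : d.contains k = true) :
    (pvStep p d v).getD k 0
      = d.getD k 0 + (if k = v then (if p = [k, k] then 2 else (1 : Int)) else 0) := by
  unfold pvStep
  by_cases hkv : k = v
  · subst hkv
    rw [if_pos hk, PySem.Dict.getD_modify_self]
    simp
  · by_cases h : d.contains v = true
    · rw [if_pos h, PySem.Dict.getD_modify_of_ne d 0 _ hkv, if_neg hkv, add_zero]
    · rw [if_neg h, if_neg hkv, add_zero]

theorem keys_foldl_step (p : List Int) (vs : List Int) (d : PySem.Dict Int Int) :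
    (vs.foldl (pvStep p) d).keys = d.keys := by
  induction vs generalizing d with
  | nil => rfl
  | cons v vs ih => rw [List.foldl_cons, ih, keys_pvStep]

theorem keys_pvBump (d : PySem.Dict Int Int) (p : List Int) :
    (pvBump d p).keys = d.keys := keys_foldl_step _ _ _

theorem keys_foldl_pvBump (L : List (List Int)) (d : PySem.Dict Int Int) :
    (L.foldl pvBump d).keys = d.keys := by
  induction L generalizing d with
  | nil => rfl
  | cons p L ih => rw [List.foldl_cons, ih, keys_pvBump]

theorem contains_pvBump (d : PySem.Dict Int Int) (p : List Int) (k : Int) :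
    (pvBump d p).contains k = d.contains k := by
  rw [PySem.Dict.contains_eq_decide_mem_keys, PySem.Dict.contains_eq_decide_mem_keys, keys_pvBump]

-- the per-distinct-value loop adds the amount once at k when k ∈ vs
theorem getD_foldl_step (p : List Int) (vs : List Int) (d : PySem.Dict Int Int) (k : Int)
    (hnd : vs.Nodup) (hk : d.contains k = true) :
    (vs.foldl (pvStep p) d).getD k 0
      = d.getD k 0 + (if k ∈ vs then (if p = [k, k] then 2 else (1 : Int)) else 0) := by
  induction vs generalizing d with
  | nil => simp
  | cons v vs ih =>
    rw [List.foldl_cons,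
        ih _ (List.nodup_cons.mp hnd).2 (by rw [contains_pvStep]; exact hk),
        getD_pvStep _ _ _ _ hk]
    have hv : v ∉ vs := (List.nodup_cons.mp hnd).1
    by_cases hkv : k = v
    · subst hkv; simp [hv]
    · simp [hkv]

theorem getD_pvBump (d : PySem.Dict Int Int) (p : List Int) (k : Int)
    (hk : d.contains k = true) :
    (pvBump d p).getD k 0
      = d.getD k 0 + (if p = [k, k] then 2 else if k ∈ p then (1 : Int) else 0) := by
  unfold pvBump
  rw [getD_foldl_step _ _ _ _ (PySem.List.nodup_dedup _) hk]
  by_cases hkp : k ∈ p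
  · rw [if_pos ((PySem.List.mem_dedup _ _).mpr hkp), if_pos hkp]
  · rw [if_neg (fun h => hkp ((PySem.List.mem_dedup _ _).mp h)), if_neg hkp]
    have : ¬ p = [k, k] := by rintro rfl; exact hkp (by simp)
    rw [if_neg this]

theorem getD_foldl_pvBump (L : List (List Int)) (d : PySem.Dict Int Int) (k : Int)
    (hk : d.contains k = true) :
    (L.foldl pvBump d).getD k 0 = d.getD k 0 + pvS k L := by
  induction L generalizing d with
  | nil => simp [pvS_nil]
  | cons p L ih =>
    rw [List.foldl_cons, ih _ (by rw [contains_pvBump]; exact hk),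
        getD_pvBump _ _ _ hk, pvS_cons]
    ring

-- the initial dict of B, as a literal
theorem init_eq :
    (PySem.List.pyRange 0 7 1).foldl (fun d n => d.insert n 0) (PySem.Dict.empty : PySem.Dict Int Int)
      = PySem.Dict.mk [(0, 0), (1, 0), (2, 0), (3, 0), (4, 0), (5, 0), (6, 0)] := by decide

-- ===== VERDICT (by name: the statement is the Claim_ definition above) =====
theorem calculate_numbers_spec : Claim_equal_calculate_numbers := by
  intro cp ds _
  simp only [Spec_calculate_numbers, calculate_numbers, calculate_numbers_alt]
  rw [init_eq]
  set vis := cp ++ ds with hvis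
  set init : PySem.Dict Int Int := PySem.Dict.mk [(0, 0), (1, 0), (2, 0), (3, 0), (4, 0), (5, 0), (6, 0)] with hinit
  -- A's side: a fold inserting fresh distinct keys appends
  rw [PySem.Dict.items_foldl_insert_fresh (PySem.List.pyRange 0 7 1) (fun i => i) _
        PySem.Dict.empty (fun a _ => rfl)
        (by simpa using PySem.List.nodup_pyRange_one 0 7)]
  -- B's side: items of the final dict, key by key
  have hkeys : ((vis.foldl pvBump init).keys) = init.keys := keys_foldl_pvBump _ _
  have hnd : (vis.foldl pvBump init).keys.Nodup := by rw [hkeys]; decide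
  rw [PySem.Dict.items_eq_map_keys _ hnd (0 : Int), hkeys]
  have hik : init.keys = PySem.List.pyRange 0 7 1 := by decide
  rw [hik, show (PySem.Dict.empty : PySem.Dict Int Int).items = [] from rfl, List.nil_append]
  refine List.map_congr_left (fun k hkmem => ?_)
  have hk7 : 0 ≤ k ∧ k < 7 := (PySem.List.mem_pyRange_one).mp hkmem
  have hkc : init.contains k = true := by
    obtain ⟨h0, h7⟩ := hk7; interval_cases k <;> decide
  have hg0 : init.getD k 0 = 0 := by
    obtain ⟨h0, h7⟩ := hk7; interval_cases k <;> decide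
  rw [countA_eq, getD_foldl_pvBump _ _ _ hkc, hg0]
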